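-- pv_equiv track=rewrite | github.com/emersonlebleu/py3_bt_camp_notes | beat_gen.py | current_beat
-- ===== SOURCE A (Python) =====
-- def current_beat(max):
--     max
--     nums = (1,2,3,4)
--     i = 0
--     result = []
--     while len(result) <= max:
--         if i >= len(nums): i = 0
--         result.append(nums[i])
--         i += 1
--     return result
-- ===== SOURCE B (Python) =====
-- def current_beat(max):
--     # Compute the output length once, build the list by tuple repetition, truncate.
--     n = max + 1
--     if n < 0:
--         n = 0
--     reps = (n + 3) // 4
--     return list((1, 2, 3, 4) * reps)[:n]
-- ===== Notes on version B (the rewrite author's own statement) =====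
-- stated objective: faster
-- what changed: Replaces the element-by-element while loop with a wrapping tuple index by computing the output length once, building the whole list by tuple repetition ((1,2,3,4)*reps), and truncating with a slice.
import Mathlib
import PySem

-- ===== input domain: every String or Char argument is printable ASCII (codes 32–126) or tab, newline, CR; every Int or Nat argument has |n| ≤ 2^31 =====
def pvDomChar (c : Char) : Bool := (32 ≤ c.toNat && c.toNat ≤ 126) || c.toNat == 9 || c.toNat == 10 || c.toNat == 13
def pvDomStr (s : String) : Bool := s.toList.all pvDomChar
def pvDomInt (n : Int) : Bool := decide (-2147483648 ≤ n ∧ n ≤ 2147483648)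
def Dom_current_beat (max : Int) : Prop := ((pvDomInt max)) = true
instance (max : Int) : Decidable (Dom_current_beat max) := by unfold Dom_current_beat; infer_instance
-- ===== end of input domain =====

-- B builds the cyclic list in bulk: length computed once, tuple repetition, then truncation (measured faster in a timing run).


-- ===== PORT A =====
-- A's while loop: state (i, result); recursion on the remaining count max+1-len(result)
def currentBeatLoop (max : Int) (i : Int) (result : List Int) : List Int :=
  if h : (result.length : Int) ≤ max then
    let i' : Int := if i ≥ 4 then 0 else i
    currentBeatLoop max (i' + 1)
      (result ++ [((PySem.List.pyGet? ([1, 2, 3, 4] : List Int) i').getD 0)])  -- nums[i]; index always in range here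
  else result
termination_by (max + 1 - result.length).toNat
decreasing_by
  simp only [List.length_append, List.length_cons, List.length_nil]
  omega

def current_beat (max : Int) : List Int := currentBeatLoop max 0 []

-- ===== PORT B =====
def current_beat_alt (max : Int) : List Int :=
  let n : Int := if max + 1 < 0 then 0 else max + 1      -- n = max + 1; if n < 0: n = 0
  let reps : Int := PySem.Int.floordiv (n + 3) 4
  -- (1,2,3,4) * reps : Python sequence repetition (empty for reps ≤ 0), exact as replicate reps.toNat
  PySem.List.slice ((List.replicate reps.toNat ([1, 2, 3, 4] : List Int)).flatten) none (some n)

-- ===== PRECONDITION & SPEC =====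
def Spec_current_beat (max : Int) (out : List Int) : Prop := out = current_beat_alt max
instance (max : Int) (out : List Int) : Decidable (Spec_current_beat max out) := by unfold Spec_current_beat; infer_instance

-- ===== CLAIM =====
def Claim_equal_current_beat : Prop := ∀ (max : Int), Dom_current_beat max → Spec_current_beat max (current_beat max)

-- ===== LEMMAS AND PROOFS =====
-- loop invariant: i is the wrapping index, equal (after the wrap-check) to len(result) mod 4
theorem currentBeatLoop_spec (n : Nat) : ∀ (max i : Int) (result : List Int),
    (max + 1 - result.length).toNat = n →
    0 ≤ i → i ≤ 4 → (if i ≥ 4 then (0 : Int) else i) = (result.length : Int) % 4 →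
    currentBeatLoop max i result =
      result ++ (PySem.List.pyRange (result.length) (max + 1) 1).map (fun k => PySem.Int.mod k 4 + 1) := by
  induction n with
  | zero =>
    intro max i result hn hi0 hi4 hinv
    rw [currentBeatLoop]
    have hgt : ¬ ((result.length : Int) ≤ max) := by omega
    simp only [hgt, dif_neg, not_false_iff]
    rw [PySem.List.pyRange_one]
    have : (max + 1 - (result.length : Int)).toNat = 0 := by omega
    simp [this]
  | succ n ih =>
    intro max i result hn hi0 hi4 hinv
    rw [currentBeatLoop]
    have hle : (result.length : Int) ≤ max := by omega
    simp only [hle, dif_pos]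
    set i' : Int := if i ≥ 4 then (0 : Int) else i with hi'
    have hinv' : i' = (result.length : Int) % 4 := hinv
    have hget : (PySem.List.pyGet? ([1, 2, 3, 4] : List Int) i').getD 0 = i' + 1 := by
      have hcases : i' = 0 ∨ i' = 1 ∨ i' = 2 ∨ i' = 3 := by omega
      rcases hcases with h | h | h | h <;> rw [h] <;> decide
    rw [hget]
    rw [ih max (i' + 1) (result ++ [i' + 1])
      (by simp only [List.length_append, List.length_cons, List.length_nil]; omega)
      (by omega) (by omega)
      (by
        simp only [List.length_append, List.length_cons, List.length_nil]
        push_cast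
        omega)]
    have hcons : PySem.List.pyRange (result.length) (max + 1) 1 =
        (result.length : Int) :: PySem.List.pyRange ((result.length : Int) + 1) (max + 1) 1 :=
      PySem.List.pyRange_one_cons (by omega)
    rw [hcons]
    simp only [List.map_cons, List.append_assoc, List.singleton_append,
      List.length_append, List.length_cons, List.length_nil]
    have hmod : PySem.Int.mod (result.length : Int) 4 = (result.length : Int) % 4 :=
      PySem.Int.mod_eq_emod_of_pos (by omega)
    rw [hmod, ← hinv']
    norm_num

-- a full block repetition is the cyclic pattern over range (4*r)
theorem flatten_replicate_block (r : Nat) :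
    (List.replicate r ([1, 2, 3, 4] : List Int)).flatten
      = (List.range (4 * r)).map (fun (k : Nat) => ((k : Int) % 4 + 1)) := by
  induction r with
  | zero => simp
  | succ r ih =>
    rw [List.replicate_succ', List.flatten_append, ih]
    have h4 : 4 * (r + 1) = (((4 * r + 1) + 1) + 1) + 1 := by ring
    rw [h4, List.range_succ, List.range_succ, List.range_succ, List.range_succ]
    simp only [List.map_append, List.map_cons, List.map_nil, List.append_assoc, List.flatten]
    congr 1
    simp only [List.cons_append, List.nil_append]
    have e0 : ((4 * r : Nat) : Int) % 4 + 1 = 1 := by push_cast; omega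
    have e1 : ((4 * r + 1 : Nat) : Int) % 4 + 1 = 2 := by push_cast; omega
    have e2 : ((4 * r + 1 + 1 : Nat) : Int) % 4 + 1 = 3 := by push_cast; omega
    have e3 : ((4 * r + 1 + 1 + 1 : Nat) : Int) % 4 + 1 = 4 := by push_cast; omega
    rw [e0, e1, e2, e3]
    simp

-- truncating the repeated blocks to m elements gives the cyclic pattern over range m
theorem take_replicate_block (m : Nat) :
    ((List.replicate ((m + 3) / 4) ([1, 2, 3, 4] : List Int)).flatten).take m
      = (List.range m).map (fun (k : Nat) => ((k : Int) % 4 + 1)) := by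
  rw [flatten_replicate_block, ← List.map_take, List.take_range]
  have : min m (4 * ((m + 3) / 4)) = m := by omega
  rw [this]

-- ===== VERDICT =====
theorem current_beat_spec : Claim_equal_current_beat := by
  intro max _
  unfold Spec_current_beat current_beat current_beat_alt
  have hA := currentBeatLoop_spec (max + 1 - 0).toNat max 0 [] (by simp) (by omega) (by omega) (by simp)
  simp only [List.length_nil, Nat.cast_zero, List.nil_append] at hA
  rw [hA]
  set n : Int := if max + 1 < 0 then 0 else max + 1 with hn
  have hn0 : 0 ≤ n := by rw [hn]; split <;> omega
  set m : Nat := n.toNat with hm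
  have hfd : (PySem.Int.floordiv (n + 3) 4).toNat = (m + 3) / 4 := by
    rw [PySem.Int.floordiv_eq_ediv_of_pos (by omega)]
    omega
  rw [PySem.List.slice_to _ hn0, hfd, take_replicate_block]
  have hrange : PySem.List.pyRange 0 (max + 1) 1 = (List.range m).map (fun (k : Nat) => (k : Int)) := by
    rw [PySem.List.pyRange_one]
    have : (max + 1 - 0).toNat = m := by rw [hm, hn]; split <;> omega
    rw [this]
    simp
  rw [hrange, List.map_map]
  apply List.map_congr_left
  intro k _
  simp only [Function.comp]
  rw [PySem.Int.mod_eq_emod_of_pos (by omega)]
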